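-- pv_equiv track=rewrite | github.com/dana11235/advent_of_code | 2019/day21/day21-old.py | can_walk
-- ===== SOURCE A (Python) =====
-- def can_walk(combo):
--     jump = False
--     walk = False
--
--     if len(combo) < 4:
--         jump = True
--     elif combo[3] != '.':
--         # Jumping won't land in a pit
--         jump = can_walk(combo[4:])
--
--     if len(combo) == 0:
--         walk = True
--     elif combo[0] != '.':
--         # walking won't land in a pit
--         walk = can_walk(combo[1:])
--
--     if jump and not walk:
--         return False
--     else:
--         # If there is no path forward, this returns true, but that's ok
--         return True
-- ===== SOURCE B (Python) =====
-- def can_walk(combo):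
--     # Bottom-up DP over suffix positions: res[i] == can_walk(combo[i:]); O(n) instead of O(2^n).
--     n = len(combo)
--     res = [True] * (n + 1)
--     for i in range(n - 1, -1, -1):
--         m = n - i
--         if m < 4:
--             jump = True
--         elif combo[i + 3] != '.':
--             jump = res[i + 4]
--         else:
--             jump = False
--         if combo[i] != '.':
--             walk = res[i + 1]
--         else:
--             walk = False
--         res[i] = (not jump) or walk
--     return res[0]
-- ===== Notes on version B (the rewrite author's own statement) =====
-- stated objective: faster
-- what changed: Replaced the exponential double recursion over suffixes with a bottom-up dynamic program filling res[i] = can_walk(combo[i:]) in one backward pass; intended as asymptotically faster (timing: A timed out at n=64 where B returned; ratio at sizes both finish was unmeasurable).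
import Mathlib
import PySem

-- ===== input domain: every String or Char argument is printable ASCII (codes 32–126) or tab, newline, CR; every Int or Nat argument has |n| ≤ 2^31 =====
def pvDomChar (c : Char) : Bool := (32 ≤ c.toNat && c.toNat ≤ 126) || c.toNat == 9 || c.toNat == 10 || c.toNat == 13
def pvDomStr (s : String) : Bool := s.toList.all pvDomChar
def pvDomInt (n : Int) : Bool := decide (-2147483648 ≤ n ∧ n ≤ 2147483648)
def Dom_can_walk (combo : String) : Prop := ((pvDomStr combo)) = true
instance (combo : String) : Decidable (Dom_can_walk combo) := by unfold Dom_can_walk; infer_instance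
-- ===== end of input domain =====

-- B replaces A's exponential double recursion with a one-pass suffix DP; intended as faster (in a timing run A timed out at n=64 where B returned; no ratio could be measured at sizes both finish).

-- ===== PORT A =====
-- literal transliteration of A's recursion; combo[3]/combo[0] are in range in their
-- branches, so '(pyGet? …).getD' is exact there; combo[4:]/combo[1:] are List.drop.
def can_walk_rec (s : List Char) : Bool :=
  let jump : Bool :=
    if s.length < 4 then true
    else if (PySem.List.pyGet? s 3).getD ' ' ≠ '.' then can_walk_rec (s.drop 4)
    else false
  let walk : Bool :=
    if s.length = 0 then true
    else if (PySem.List.pyGet? s 0).getD ' ' ≠ '.' then can_walk_rec (s.drop 1)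
    else false
  if jump && !walk then false else true
termination_by s.length
decreasing_by
  all_goals simp [List.length_drop]
  all_goals omega

def can_walk (combo : String) : Bool := can_walk_rec combo.toList

-- ===== PORT B =====
-- B's backward loop filling res[n..0]; ported as a recursion that returns the list
-- [res_i, res_{i+1}, …, res_n] for the current suffix (same values, same order of filling).
def can_walk_dp : List Char → List Bool
  | [] => [true]
  | c :: rest =>
    let r := can_walk_dp rest
    let jump : Bool :=
      if rest.length < 3 then true          -- m = rest.length + 1 < 4
      else if rest[2]?.getD ' ' ≠ '.' then r[3]?.getD true
      else false
    let walk : Bool :=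
      if c ≠ '.' then r[0]?.getD true else false
    (!jump || walk) :: r

def can_walk_alt (combo : String) : Bool := (can_walk_dp combo.toList).headD true

-- ===== PRECONDITION & SPEC =====
def Spec_can_walk (combo : String) (out : Bool) : Prop := out = can_walk_alt combo
instance (combo : String) (out : Bool) : Decidable (Spec_can_walk combo out) := by unfold Spec_can_walk; infer_instance

-- ===== CLAIM (what is proved, stated in full; the proofs are below) =====
def Claim_equal_can_walk : Prop := ∀ (combo : String), Dom_can_walk combo → Spec_can_walk combo (can_walk combo)

-- ===== LEMMAS AND PROOFS =====

-- the intended content of the DP list: can_walk_rec on each suffix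
def suffList : List Char → List Bool
  | [] => [can_walk_rec []]
  | c :: rest => can_walk_rec (c :: rest) :: suffList rest

theorem suffList_get? (s : List Char) (k : Nat) (hk : k ≤ s.length) :
    (suffList s)[k]? = some (can_walk_rec (s.drop k)) := by
  induction s generalizing k with
  | nil =>
    have hz : k = 0 := by simpa using hk
    subst hz
    simp [suffList]
  | cons c rest ih =>
    cases k with
    | zero => simp [suffList]
    | succ k =>
      simp only [suffList, List.getElem?_cons_succ, List.drop_succ_cons]
      exact ih k (by simpa using hk)

theorem can_walk_rec_eq_or (s : List Char) :
    can_walk_rec s =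
      (!(if s.length < 4 then true
         else if (PySem.List.pyGet? s 3).getD ' ' ≠ '.' then can_walk_rec (s.drop 4)
         else false) ||
       (if s.length = 0 then true
        else if (PySem.List.pyGet? s 0).getD ' ' ≠ '.' then can_walk_rec (s.drop 1)
        else false)) := by
  rw [can_walk_rec]
  cases (if s.length < 4 then true
         else if (PySem.List.pyGet? s 3).getD ' ' ≠ '.' then can_walk_rec (s.drop 4)
         else false) <;>
  cases (if s.length = 0 then true
         else if (PySem.List.pyGet? s 0).getD ' ' ≠ '.' then can_walk_rec (s.drop 1)
         else false) <;> rfl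

theorem dp_eq_suffList (s : List Char) : can_walk_dp s = suffList s := by
  induction s with
  | nil => simp [can_walk_dp, suffList, can_walk_rec]
  | cons c rest ih =>
    simp only [can_walk_dp, ih, suffList]
    congr 1
    rw [can_walk_rec_eq_or (c :: rest)]
    congr 1
    · -- jump components agree
      congr 1
      by_cases h3 : rest.length < 3
      · simp [h3, List.length_cons]
        omega
      · have hlt : ¬ (c :: rest).length < 4 := by simp [List.length_cons]; omega
        have hget : PySem.List.pyGet? (c :: rest) 3 = rest[2]? := by
          have : ((3:Nat) : Int) = (3 : Int) := by norm_num
          rw [← this, PySem.List.pyGet?_natCast]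
          simp
        have h2 : 2 < rest.length := by omega
        have hdrop : (c :: rest).drop 4 = rest.drop 3 := rfl
        rw [if_neg h3, if_neg hlt, hget, hdrop]
        rw [List.getElem?_eq_getElem h2]
        have := suffList_get? rest 3 (by omega)
        rw [this]
        simp
    · -- walk components agree
      have hne : (c :: rest).length ≠ 0 := by simp
      have hget : PySem.List.pyGet? (c :: rest) 0 = some c := by
        simp
      rw [if_neg hne, hget]
      have := suffList_get? rest 0 (by omega)
      simp only [this, List.drop_one, List.tail_cons, Option.getD_some]
      by_cases hc : c = '.' <;> simp [hc]

-- ===== VERDICT (by name: the statement is the Claim_ definition above) =====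
theorem can_walk_spec : Claim_equal_can_walk := by
  intro combo _
  unfold Spec_can_walk can_walk can_walk_alt
  rw [dp_eq_suffList]
  cases h : combo.toList with
  | nil => simp [suffList]
  | cons c rest => simp [suffList]
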